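-- pv_equiv track=rewrite | github.com/AhmedElAmraoui/QSE | src/grouping.py | determine_measurement_basis
-- ===== SOURCE A (Python) =====
-- def determine_measurement_basis(pauli_group):
--     """
--     Bestimmt eine Messbasis (als Liste von 'X', 'Y', 'Z', 'I') für eine Gruppe kommutierender Pauli-Strings.
--     Die zurückgegebene Basis diagonalisiert alle Paulis in der Gruppe gleichzeitig.
--     """
--     num_qubits = len(pauli_group[0])
--     basis = ['Z'] * num_qubits  # Default: Messung in Z
--
--     for qubit in range(num_qubits):
--         #paulis_on_qubit = set(p[qubit] for p in pauli_group if p[qubit] != 'I')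
--         paulis_on_qubit = set(p[num_qubits-1-qubit] for p in pauli_group if p[num_qubits-1-qubit] != 'I')
--
--         if not paulis_on_qubit:
--             basis[qubit] = 'I'
--         elif paulis_on_qubit == {'Z'}:
--             basis[qubit] = 'Z'
--         elif paulis_on_qubit == {'X'}:
--             basis[qubit] = 'X'
--         elif paulis_on_qubit == {'Y'}:
--             basis[qubit] = 'Y'
--         else:
--             # Mehrere unterschiedliche Paulis (X,Y,Z) → nicht gemeinsam diagonal.
--             # In Gruppenbildung sollte das nicht vorkommen.
--             raise ValueError(f"Nicht kompatible Paulis auf Qubit {qubit}: {paulis_on_qubit}")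
--
--     return basis
-- ===== SOURCE B (Python) =====
-- def determine_measurement_basis(pauli_group):
--     """
--     Bestimmt eine Messbasis (als Liste von 'X', 'Y', 'Z', 'I') für eine Gruppe kommutierender Pauli-Strings.
--     Transponiert die Gruppe einmal in Spalten (zip) und reduziert jede Spalte mit einem
--     skalaren Akkumulator ('I' bis der erste Nicht-'I'-Buchstabe erscheint), ganz ohne Mengen.
--     """
--     num_qubits = len(pauli_group[0])
--     columns = list(zip(*pauli_group))[:num_qubits]
--     basis = []
--     for qubit, column in enumerate(reversed(columns)):
--         acc = 'I'
--         for c in column: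
--             if c == 'I' or c == acc:
--                 continue
--             if acc == 'I':
--                 acc = c
--             else:
--                 raise ValueError(f"Nicht kompatible Paulis auf Qubit {qubit}: {{{acc!r}, {c!r}}}")
--         basis.append(acc)
--     return basis
-- ===== Notes on version B (the rewrite author's own statement) =====
-- stated objective: alternative
-- what changed: B transposes the group once into columns (zip(*pauli_group)) and reduces each column with a single scalar accumulator char ('I' until the first non-'I' letter, conflict raises), instead of A's per-qubit rescan of all strings building a set and comparing it against {'Z'}/{'X'}/{'Y'}.
import Mathlib
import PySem

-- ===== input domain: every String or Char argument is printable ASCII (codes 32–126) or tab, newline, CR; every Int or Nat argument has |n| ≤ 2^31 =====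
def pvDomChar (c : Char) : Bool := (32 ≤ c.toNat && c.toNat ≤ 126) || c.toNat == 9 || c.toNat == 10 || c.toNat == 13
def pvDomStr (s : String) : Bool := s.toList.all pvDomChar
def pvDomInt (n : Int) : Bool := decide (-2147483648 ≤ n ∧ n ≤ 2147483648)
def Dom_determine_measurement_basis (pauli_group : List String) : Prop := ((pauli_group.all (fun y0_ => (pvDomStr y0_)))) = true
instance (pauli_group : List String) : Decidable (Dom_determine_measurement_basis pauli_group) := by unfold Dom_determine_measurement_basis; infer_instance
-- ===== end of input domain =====

-- B transposes the group once into columns (Python zip) and reduces each column with a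
-- scalar accumulator instead of A's per-qubit set building (objective: alternative).

-- ===== PORT A =====
-- the character p[num_qubits-1-qubit]; '?' default unreachable under Pre_ (index in range there)
def pvColCharA (num_qubits : Nat) (qubit : Int) (p : String) : Char :=
  (PySem.Str.pyGet? p ((num_qubits : Int) - 1 - qubit)).getD '?'

def determine_measurement_basis (pauli_group : List String) : List String :=
  let num_qubits := (pauli_group.headD "").length
  (List.range num_qubits).foldl (fun basis (qubit : Nat) =>
    let paulis_on_qubit : PySem.Set Char :=
      PySem.Set.ofList ((pauli_group.map (pvColCharA num_qubits (Int.ofNat qubit))).filter (fun c => c != 'I'))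
    if paulis_on_qubit.isEmpty then basis.set qubit "I"
    else if PySem.Set.equal paulis_on_qubit (PySem.Set.ofList ['Z']) then basis.set qubit "Z"
    else if PySem.Set.equal paulis_on_qubit (PySem.Set.ofList ['X']) then basis.set qubit "X"
    else if PySem.Set.equal paulis_on_qubit (PySem.Set.ofList ['Y']) then basis.set qubit "Y"
    else basis.set qubit "?"   -- Python raises ValueError here; excluded by Pre_
  ) (List.replicate num_qubits "Z")

-- ===== PORT B =====
-- Python's zip(*rows): truncates at the shortest row; zip() of an empty argument list is empty
def pvZipStar (rows : List (List Char)) : List (List Char) :=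
  if _h1 : rows.isEmpty || rows.any (fun r => r.isEmpty) then []
  else (rows.map (fun r => r.headD 'I')) :: pvZipStar (rows.map List.tail)
termination_by (rows.headD []).length
decreasing_by
  simp only [Bool.or_eq_true, List.isEmpty_iff, List.any_eq_true, not_or] at _h1
  cases rows with
  | nil => exact absurd rfl _h1.1
  | cons x xs =>
    have hx : x ≠ [] := by
      intro hx
      exact _h1.2 ⟨x, List.mem_cons_self, by simp [hx]⟩
    cases x with
    | nil => exact absurd rfl hx
    | cons a as => simp

-- the inner accumulator loop of Source B, starting from a given accumulator
def pvReduceFrom (acc : Char) (column : List Char) : Char :=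
  column.foldl (fun acc c =>
    if c == 'I' || c == acc then acc
    else if acc == 'I' then c
    else '!'   -- Python raises ValueError here; excluded by Pre_
  ) acc

def determine_measurement_basis_alt (pauli_group : List String) : List String :=
  let num_qubits := (pauli_group.headD "").length
  let columns := (pvZipStar (pauli_group.map String.toList)).take num_qubits
  columns.reverse.map (fun column => String.ofList [pvReduceFrom 'I' column])

-- ===== PRECONDITION & SPEC =====
-- Pre_ excludes exactly the inputs where the Python A raises: the empty list (IndexError on
-- pauli_group[0]), a string shorter than len(pauli_group[0]) (IndexError), and a column whose
-- non-'I' letters are not all one of the same Pauli letter X/Y/Z (ValueError).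
def Pre_determine_measurement_basis (pauli_group : List String) : Prop :=
  (!pauli_group.isEmpty
    && pauli_group.all (fun p => (pauli_group.headD "").length ≤ p.length)
    && pauli_group.all (fun p =>
        (p.toList.take (pauli_group.headD "").length).all
          (fun c => c == 'I' || c == 'X' || c == 'Y' || c == 'Z'))
    && pauli_group.all (fun p => pauli_group.all (fun p' =>
        (List.range (pauli_group.headD "").length).all (fun i =>
          p.toList.getD i 'I' == 'I' || p'.toList.getD i 'I' == 'I'
            || p.toList.getD i 'I' == p'.toList.getD i 'I')))) = true
instance (pauli_group : List String) : Decidable (Pre_determine_measurement_basis pauli_group) := by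
  unfold Pre_determine_measurement_basis; infer_instance

def pvWitness_determine_measurement_basis : List String := ["XIZ", "IYZ"]

def Spec_determine_measurement_basis (pauli_group : List String) (out : List String) : Prop := out = determine_measurement_basis_alt pauli_group
instance (pauli_group : List String) (out : List String) : Decidable (Spec_determine_measurement_basis pauli_group out) := by unfold Spec_determine_measurement_basis; infer_instance

-- ===== CLAIM (what is proved, stated in full; the proofs are below) =====
def Claim_equal_determine_measurement_basis : Prop := ∀ (pauli_group : List String), Dom_determine_measurement_basis pauli_group → Pre_determine_measurement_basis pauli_group → Spec_determine_measurement_basis pauli_group (determine_measurement_basis pauli_group)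

-- ===== LEMMAS AND PROOFS =====

-- A's index-setting loop over range, starting from any long-enough list, produces a map
theorem pv_foldl_set_range (g : Nat → String) :
    ∀ (n : Nat) (l : List String), n ≤ l.length →
    (List.range n).foldl (fun b q => b.set q (g q)) l = (List.range n).map g ++ l.drop n := by
  intro n
  induction n with
  | zero => simp
  | succ n ih =>
    intro l hl
    rw [List.range_succ, List.foldl_append]
    rw [ih l (by omega)]
    simp only [List.foldl_cons, List.foldl_nil]
    rw [List.set_append]
    simp only [List.length_map, List.length_range, Nat.sub_self]
    rw [if_neg (lt_irrefl n)]
    rw [show (List.drop n l).set 0 (g n) = g n :: List.drop (n+1) l from by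
      rw [List.drop_eq_getElem_cons (show n < l.length by omega)]; rfl]
    simp

-- classification of one column's letter set (the branch cascade of A's loop body)
def pvClassify (s : PySem.Set Char) : String :=
  if s.isEmpty then "I"
  else if PySem.Set.equal s (PySem.Set.ofList ['Z']) then "Z"
  else if PySem.Set.equal s (PySem.Set.ofList ['X']) then "X"
  else if PySem.Set.equal s (PySem.Set.ofList ['Y']) then "Y"
  else "?"

-- A's loop body as a single set-at-index
theorem pv_A_fun (s : Nat → PySem.Set Char) :
    (fun (basis : List String) (qubit : Nat) =>
      if (s qubit).isEmpty then basis.set qubit "I"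
      else if PySem.Set.equal (s qubit) (PySem.Set.ofList ['Z']) then basis.set qubit "Z"
      else if PySem.Set.equal (s qubit) (PySem.Set.ofList ['X']) then basis.set qubit "X"
      else if PySem.Set.equal (s qubit) (PySem.Set.ofList ['Y']) then basis.set qubit "Y"
      else basis.set qubit "?")
    = (fun basis qubit => basis.set qubit (pvClassify (s qubit))) := by
  funext basis qubit
  simp only [pvClassify]
  split_ifs <;> rfl

-- Python's zip(*rows), truncated to n, is the list of the first n columns
theorem pv_zip_take (n : Nat) : ∀ (rows : List (List Char)), rows ≠ [] →
    (∀ r ∈ rows, n ≤ r.length) →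
    (pvZipStar rows).take n
      = (List.range n).map (fun i => rows.map (fun r => r.getD i 'I')) := by
  induction n with
  | zero => simp
  | succ n ih =>
    intro rows hne hlen
    have hall : ∀ r ∈ rows, r ≠ [] := by
      intro r hr
      exact List.ne_nil_of_length_pos (lt_of_lt_of_le (Nat.succ_pos n) (hlen r hr))
    rw [pvZipStar]
    rw [dif_neg (by
      simp only [Bool.or_eq_true, List.any_eq_true, not_or]
      refine ⟨by simpa using hne, fun hc => ?_⟩
      obtain ⟨r, hr, hre⟩ := hc
      exact hall r hr (by simpa using hre))]
    rw [List.take_succ_cons]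
    rw [ih (rows.map List.tail)
      (by simpa using hne)
      (by
        intro r hr
        obtain ⟨s, hs, rfl⟩ := List.mem_map.1 hr
        have := hlen s hs
        simp only [List.length_tail]
        omega)]
    rw [List.range_succ_eq_map]
    simp only [List.map_cons, List.map_map]
    congr 1
    · apply List.map_congr_left
      intro r hr
      cases r with
      | nil => exact absurd rfl (hall _ hr)
      | cons a as => rfl
    · apply List.map_congr_left
      intro i _
      simp only [Function.comp]
      apply List.map_congr_left
      intro r hr
      cases r with
      | nil => exact absurd rfl (hall _ hr)
      | cons a as => rfl

-- reversing a map over range flips the index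
theorem pv_reverse_map_range {α : Type} (n : Nat) (f : Nat → α) :
    ((List.range n).map f).reverse = (List.range n).map (fun q => f (n - 1 - q)) := by
  apply List.ext_getElem
  · simp
  · intro i h1 h2
    simp only [List.length_reverse, List.length_map, List.length_range] at h1
    rw [List.getElem_reverse]
    simp only [List.getElem_map, List.getElem_range, List.length_map, List.length_range]

-- the accumulator, once set to the column's letter, stays there
theorem pv_reduce_stay (c : Char) : ∀ (l : List Char), (∀ x ∈ l, x = 'I' ∨ x = c) →
    pvReduceFrom c l = c := by
  intro l
  induction l with
  | nil => intro _; rfl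
  | cons a as ih =>
    intro h
    rcases h a List.mem_cons_self with rfl | rfl
    · simpa [pvReduceFrom] using ih (fun x hx => h x (List.mem_cons_of_mem _ hx))
    · simpa [pvReduceFrom] using ih (fun x hx => h x (List.mem_cons_of_mem _ hx))

-- a column whose letters are all 'I' or c (with c present, c ≠ 'I') reduces to c
theorem pv_reduce_hit (c : Char) (hc : c ≠ 'I') : ∀ (l : List Char),
    (∀ x ∈ l, x = 'I' ∨ x = c) → c ∈ l → pvReduceFrom 'I' l = c := by
  intro l
  induction l with
  | nil => intro _ h; cases h
  | cons a as ih =>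
    intro h hmem
    rcases h a List.mem_cons_self with rfl | rfl
    · have : c ∈ as := by
        rcases List.mem_cons.1 hmem with h' | h'
        · exact absurd h' hc
        · exact h'
      simpa [pvReduceFrom] using ih (fun x hx => h x (List.mem_cons_of_mem _ hx)) this
    · have hstep : pvReduceFrom 'I' (a :: as) = pvReduceFrom a as := by
        simp only [pvReduceFrom, List.foldl_cons]
        rw [if_neg (by simp [hc]), if_pos (by simp)]
      rw [hstep]
      exact pv_reduce_stay a as (fun x hx => h x (List.mem_cons_of_mem _ hx))

-- an all-'I' column reduces to 'I'
theorem pv_reduce_id : ∀ (l : List Char), (∀ x ∈ l, x = 'I') → pvReduceFrom 'I' l = 'I' := by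
  intro l
  induction l with
  | nil => intro _; rfl
  | cons a as ih =>
    intro h
    have ha := h a List.mem_cons_self
    subst ha
    simpa [pvReduceFrom] using ih (fun x hx => h x (List.mem_cons_of_mem _ hx))

-- adding copies of an element already present leaves the set unchanged
theorem pv_set_add_self (c : Char) : ∀ (l : List Char), (∀ x ∈ l, x = c) →
    List.foldl PySem.Set.add [c] l = [c] := by
  intro l
  induction l with
  | nil => intro _; rfl
  | cons a as ih =>
    intro h
    have ha := h a List.mem_cons_self
    subst ha
    have : PySem.Set.add [a] a = [a] := by simp [PySem.Set.add, PySem.Set.contains]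
    simpa [this] using ih (fun x hx => h x (List.mem_cons_of_mem _ hx))

-- set(non-'I' letters of a column) classified = the column reduced with the scalar accumulator
theorem pv_col_classify (col : List Char)
    (hxyz : ∀ x ∈ col, x = 'I' ∨ x = 'X' ∨ x = 'Y' ∨ x = 'Z')
    (hcomp : ∀ x ∈ col, ∀ y ∈ col, x = 'I' ∨ y = 'I' ∨ x = y) :
    pvClassify (PySem.Set.ofList (col.filter (fun c => c != 'I')))
      = String.ofList [pvReduceFrom 'I' col] := by
  by_cases hall : ∀ x ∈ col, x = 'I'
  · have hfil : col.filter (fun c => c != 'I') = [] := by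
      rw [List.filter_eq_nil_iff]
      intro x hx
      simp [hall x hx]
    rw [hfil, pv_reduce_id col hall]
    rfl
  · push Not at hall
    obtain ⟨c, hcmem, hcI⟩ := hall
    have hIc : ∀ x ∈ col, x = 'I' ∨ x = c := by
      intro x hx
      rcases hcomp x hx c hcmem with h | h | h
      · exact Or.inl h
      · exact absurd h hcI
      · exact Or.inr h
    have hfil : ∀ x ∈ col.filter (fun c => c != 'I'), x = c := by
      intro x hx
      rw [List.mem_filter] at hx
      rcases hIc x hx.1 with h | h
      · exfalso; rw [h] at hx; simp at hx
      · exact h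
    have hcfil : c ∈ col.filter (fun c => c != 'I') :=
      List.mem_filter.2 ⟨hcmem, by simp [hcI]⟩
    have hset : PySem.Set.ofList (col.filter (fun c => c != 'I')) = [c] := by
      obtain ⟨a, as, heq⟩ := List.exists_cons_of_ne_nil (List.ne_nil_of_mem hcfil)
      have ha : a = c := hfil a (heq ▸ List.mem_cons_self)
      subst ha
      rw [heq, PySem.Set.ofList_eq_foldl, List.foldl_cons]
      rw [show PySem.Set.add ([] : PySem.Set Char) a = [a] from rfl]
      exact pv_set_add_self a as (fun x hx => hfil x (heq ▸ List.mem_cons_of_mem _ hx))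
    rw [hset, pv_reduce_hit c hcI col hIc hcmem]
    rcases hxyz c hcmem with h | h | h | h
    · exact absurd h hcI
    all_goals subst h; rfl

-- ===== VERDICT (by name: the statement is the Claim_ definition above) =====
theorem determine_measurement_basis_spec : Claim_equal_determine_measurement_basis := by
  intro g _ hpre
  unfold Pre_determine_measurement_basis at hpre
  simp only [Bool.and_eq_true, Bool.not_eq_eq_eq_not, Bool.not_true, List.all_eq_true, decide_eq_true_eq, Bool.or_eq_true, beq_iff_eq, List.mem_range] at hpre
  obtain ⟨⟨⟨hne, hlen⟩, hchars⟩, hcomp⟩ := hpre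
  set n := (g.headD "").length with hn
  unfold Spec_determine_measurement_basis
  -- facts about any column index i < n
  have hgne : g ≠ [] := fun e => by simp [e] at hne
  have hcolmem : ∀ (i : Nat), i < n → ∀ p ∈ g, p.toList.getD i 'I' ∈ p.toList.take n := by
    intro i hi p hp
    have hpl : n ≤ p.toList.length := by simpa using hlen p hp
    have hil : i < (p.toList.take n).length := by simp only [List.length_take]; omega
    have heq : p.toList.getD i 'I' = (p.toList.take n)[i]'hil := by
      rw [List.getElem_take]
      exact List.getD_eq_getElem _ _ (by omega)
    rw [heq]
    exact List.getElem_mem hil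
  -- A in map normal form
  have hA : determine_measurement_basis g
      = (List.range n).map (fun q => pvClassify (PySem.Set.ofList
          ((g.map (pvColCharA n (Int.ofNat q))).filter (fun c => c != 'I')))) := by
    simp only [determine_measurement_basis, ← hn]
    rw [pv_A_fun (fun q => PySem.Set.ofList
          ((g.map (pvColCharA n (Int.ofNat q))).filter (fun c => c != 'I')))]
    rw [pv_foldl_set_range _ n (List.replicate n "Z") (by simp)]
    simp
  -- B in map normal form
  have hB : determine_measurement_basis_alt g
      = (List.range n).map (fun q => String.ofList
          [pvReduceFrom 'I' (g.map (fun p => p.toList.getD (n - 1 - q) 'I'))]) := by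
    simp only [determine_measurement_basis_alt, ← hn]
    rw [pv_zip_take n (g.map String.toList)
      (by simpa using hgne)
      (by
        intro r hr
        obtain ⟨p, hp, rfl⟩ := List.mem_map.1 hr
        simpa using hlen p hp)]
    rw [pv_reverse_map_range]
    rw [List.map_map]
    apply List.map_congr_left
    intro q _
    simp only [Function.comp_apply, List.map_map]
    rfl
  rw [hA, hB]
  apply List.map_congr_left
  intro q hq
  rw [List.mem_range] at hq
  have hi : n - 1 - q < n := by omega
  -- identify A's letter list with the column
  have hletters : g.map (pvColCharA n (Int.ofNat q))
      = g.map (fun p => p.toList.getD (n - 1 - q) 'I') := by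
    apply List.map_congr_left
    intro p hp
    have hpl : n ≤ p.toList.length := by simpa using hlen p hp
    have hcast : (n : Int) - 1 - (Int.ofNat q) = ((n - 1 - q : Nat) : Int) := by
      simp only [Int.ofNat_eq_natCast]; omega
    simp only [pvColCharA, hcast]
    rw [show PySem.Str.pyGet? p ((n - 1 - q : Nat) : Int)
        = PySem.List.pyGet? p.toList ((n - 1 - q : Nat) : Int) from rfl]
    rw [PySem.List.pyGet?_natCast]
    rw [List.getElem?_eq_getElem (by omega)]
    rw [List.getD_eq_getElem _ _ (by omega)]
    rfl
  rw [hletters]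
  apply pv_col_classify
  · intro x hx
    obtain ⟨p, hp, rfl⟩ := List.mem_map.1 hx
    have := hchars p hp _ (hcolmem _ hi p hp)
    tauto
  · intro x hx y hy
    obtain ⟨p, hp, rfl⟩ := List.mem_map.1 hx
    obtain ⟨p', hp', rfl⟩ := List.mem_map.1 hy
    have := hcomp p hp p' hp' _ hi
    tauto
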